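-- pv_equiv track=rewrite | github.com/epilectrik/voynich | phases/MIDDLE_SUBCOMPONENT_GRAMMAR/scripts/test15_kernel_primitive_reality.py | find_overlaps_in_token
-- ===== SOURCE A (Python) =====
-- def find_overlaps_in_token(token, vocab):
--     """Find overlapping sub-components and return coverage map."""
--     vocab_list = sorted([v for v in vocab if len(v) > 1 and v in token], key=len, reverse=True)
--     coverage = [[] for _ in range(len(token))]  # List of sub-components covering each position
--
--     for v in vocab_list:
--         start = 0
--         while True:
--             pos = token.find(v, start)
--             if pos == -1:
--                 break
--             for i in range(pos, pos + len(v)):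
--                 if i < len(token):
--                     coverage[i].append(v)
--             start = pos + 1
--
--     return coverage
-- ===== SOURCE B (Python) =====
-- def find_overlaps_in_token(token, vocab):
--     """Find overlapping sub-components and return coverage map."""
--     vocab_list = sorted([v for v in vocab if len(v) > 1 and v in token], key=len, reverse=True)
--     # Pass 1: hash index of every n-gram of the needed lengths -> ascending start positions.
--     lengths = list(dict.fromkeys(len(v) for v in vocab_list))
--     index = {}
--     for L in lengths:
--         for s in range(len(token) - L + 1):
--             gram = token[s:s + L]
--             if gram in index:
--                 index[gram].append(s)
--             else:
--                 index[gram] = [s]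
--     # Flat occurrence table: vocab order, then ascending start positions.
--     table = [(v, s, len(v)) for v in vocab_list for s in index.get(v, [])]
--     # Pass 2: distribute the occurrences over the covered positions.
--     coverage = [[] for _ in range(len(token))]
--     for v, s, L in table:
--         for i in range(s, s + L):
--             coverage[i].append(v)
--     return coverage
-- ===== Notes on version B (the rewrite author's own statement) =====
-- stated objective: alternative
-- what changed: Replaces A's interleaved str.find-and-mark loop by three separate passes: a hash n-gram index of the token (gram -> ascending start positions) built once, a flat occurrence table read off that index (so str.find and its restart-at-pos+1 scan disappear), and a scatter pass distributing each occurrence over its covered positions.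
import Mathlib
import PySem

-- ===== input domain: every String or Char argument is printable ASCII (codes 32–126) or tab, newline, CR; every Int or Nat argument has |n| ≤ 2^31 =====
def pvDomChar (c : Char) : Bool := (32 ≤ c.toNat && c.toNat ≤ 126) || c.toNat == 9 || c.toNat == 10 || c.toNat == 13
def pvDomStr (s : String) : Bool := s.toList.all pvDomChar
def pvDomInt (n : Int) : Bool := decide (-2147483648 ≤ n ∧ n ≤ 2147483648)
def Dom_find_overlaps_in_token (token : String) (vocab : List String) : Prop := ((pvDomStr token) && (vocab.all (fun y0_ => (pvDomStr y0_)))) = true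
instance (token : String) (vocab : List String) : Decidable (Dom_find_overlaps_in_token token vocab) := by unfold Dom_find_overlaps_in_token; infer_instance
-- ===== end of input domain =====

-- B replaces A's interleaved find-and-mark loop (str.find + in-place coverage mutation) by three
-- separate passes: a hash n-gram index of the token, a flat occurrence table read off that index,
-- and a scatter pass over the table (alternative decomposition, similar cost).

-- ===== PORT A =====
-- A's inner `while True: pos = token.find(v, start) …` loop, ported with fuel
-- (len(token) + 1 steps always suffice; established in the proofs below).
def pvWhileA (token v : String) : Nat → Int → List (List String) → List (List String)
  | 0, _, cov => cov
  | fuel+1, start, cov =>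
    let pos := PySem.Str.findFrom token v start
    if pos = -1 then cov
    else
      let cov' := (PySem.List.pyRange pos (pos + PySem.Str.len v) 1).foldl
        (fun c i => if i < PySem.Str.len token
          then c.set i.toNat ((c.getD i.toNat []) ++ [v]) else c) cov
      pvWhileA token v fuel (pos + 1) cov'

def find_overlaps_in_token (token : String) (vocab : List String) : List (List String) :=
  let vocab_list := PySem.List.sorted
    (vocab.filter (fun v => decide (1 < PySem.Str.len v) && PySem.Str.isIn v token))
    (fun v => PySem.Str.len v) true
  let coverage := (PySem.List.pyRange 0 (PySem.Str.len token) 1).map (fun _ => ([] : List String))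
  vocab_list.foldl (fun cov v => pvWhileA token v ((PySem.Str.len token).toNat + 1) 0 cov) coverage

-- ===== PORT B =====
def find_overlaps_in_token_alt (token : String) (vocab : List String) : List (List String) :=
  let vocab_list := PySem.List.sorted
    (vocab.filter (fun v => decide (1 < PySem.Str.len v) && PySem.Str.isIn v token))
    (fun v => PySem.Str.len v) true
  let lengths := PySem.List.dedup (vocab_list.map (fun v => PySem.Str.len v))
  let index := lengths.foldl (fun d L =>
      (PySem.List.pyRange 0 (PySem.Str.len token - L + 1) 1).foldl (fun d s =>
        let gram := PySem.Str.slice token (some s) (some (s + L))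
        if d.contains gram then d.insert gram ((d.getD gram []) ++ [s])
        else d.insert gram [s]) d)
    (PySem.Dict.empty : PySem.Dict String (List Int))
  let table := vocab_list.flatMap (fun v =>
    (index.getD v []).map (fun s => (v, s, PySem.Str.len v)))
  let coverage := (PySem.List.pyRange 0 (PySem.Str.len token) 1).map (fun _ => ([] : List String))
  table.foldl (fun cov t =>
    (PySem.List.pyRange t.2.1 (t.2.1 + t.2.2) 1).foldl
      (fun c i => c.set i.toNat ((c.getD i.toNat []) ++ [t.1])) cov) coverage

-- ===== PRECONDITION & SPEC =====
def Spec_find_overlaps_in_token (token : String) (vocab : List String) (out : List (List String)) : Prop := out = find_overlaps_in_token_alt token vocab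
instance (token : String) (vocab : List String) (out : List (List String)) : Decidable (Spec_find_overlaps_in_token token vocab out) := by unfold Spec_find_overlaps_in_token; infer_instance

-- ===== CLAIM (what is proved, stated in full; the proofs are below) =====
def Claim_equal_find_overlaps_in_token : Prop := ∀ (token : String) (vocab : List String), Dom_find_overlaps_in_token token vocab → Spec_find_overlaps_in_token token vocab (find_overlaps_in_token token vocab)

-- ===== LEMMAS AND PROOFS =====

-- B's ascending occurrence-start list for one vocab word (the filtered range from port B).
def pvOccs (token v : String) : List Int :=
  (PySem.List.pyRange 0 (PySem.Str.len token - PySem.Str.len v + 1) 1).filter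
    (fun s => PySem.Str.slice token (some s) (some (s + PySem.Str.len v)) == v)

-- A's marking of one occurrence (the inner `for i in range(pos, pos+len(v))` loop of port A).
def pvMark (token : String) (cov : List (List String)) (v : String) (s : Int) : List (List String) :=
  (PySem.List.pyRange s (s + PySem.Str.len v) 1).foldl
    (fun c i => if i < PySem.Str.len token
      then c.set i.toNat ((c.getD i.toNat []) ++ [v]) else c) cov

theorem pvSlice_beq (token v : String) (s : Int) (hs : 0 ≤ s) :
    ((PySem.Str.slice token (some s) (some (s + PySem.Str.len v)) == v) = true) ↔
      v.toList <+: token.toList.drop s.toNat := by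
  rw [beq_iff_eq, List.prefix_iff_eq_take, ← String.toList_inj,
    PySem.Str.toList_slice, PySem.Chars.slice_eq_listSlice,
    PySem.List.slice_toNat _ hs (by have := PySem.Str.len_eq v; omega)]
  have hn : ((s + PySem.Str.len v).toNat - s.toNat) = v.toList.length := by
    have := PySem.Str.len_eq v; omega
  rw [hn]
  exact eq_comm

theorem pvOccs_mem (token v : String) (s : Int) :
    s ∈ pvOccs token v ↔
      0 ≤ s ∧ s + v.toList.length ≤ token.toList.length ∧
        v.toList <+: token.toList.drop s.toNat := by
  unfold pvOccs
  rw [List.mem_filter, PySem.List.mem_pyRange_one]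
  have hlv := PySem.Str.len_eq v
  have hlt := PySem.Str.len_eq token
  constructor
  · rintro ⟨⟨h0, hb⟩, hsl⟩
    have hp := (pvSlice_beq token v s h0).mp hsl
    exact ⟨h0, by omega, hp⟩
  · rintro ⟨h0, hb, hp⟩
    exact ⟨⟨h0, by omega⟩, (pvSlice_beq token v s h0).mpr hp⟩

theorem pvOccs_pairwise (token v : String) : (pvOccs token v).Pairwise (· < ·) :=
  (PySem.List.pairwise_lt_pyRange_one _ _).filter _

theorem pvMarkFold_length (token v : String) (l : List Int) :
    ∀ (cov : List (List String)),
      (l.foldl (fun c i => if i < PySem.Str.len token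
        then c.set i.toNat ((c.getD i.toNat []) ++ [v]) else c) cov).length = cov.length := by
  induction l with
  | nil => intro cov; rfl
  | cons a t ih =>
    intro cov
    rw [List.foldl_cons, ih]
    split <;> simp

theorem pvMark_length (token v : String) (s : Int) (cov : List (List String)) :
    (pvMark token cov v s).length = cov.length :=
  pvMarkFold_length token v _ cov

theorem pvMarkAux_getD (token v : String) (d : Nat) :
    ∀ (a b : Int), (b - a).toNat = d → 0 ≤ a →
    ∀ (cov : List (List String)) (j : Nat), j < cov.length →
    ((PySem.List.pyRange a b 1).foldl (fun c i => if i < PySem.Str.len token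
        then c.set i.toNat ((c.getD i.toNat []) ++ [v]) else c) cov).getD j [] =
      if a ≤ (j : Int) ∧ (j : Int) < b ∧ (j : Int) < PySem.Str.len token
      then cov.getD j [] ++ [v] else cov.getD j [] := by
  induction d with
  | zero =>
    intro a b hd ha cov j hj
    rw [PySem.List.pyRange_one_eq_nil (by omega)]
    simp only [List.foldl_nil]
    rw [if_neg (by omega)]
  | succ d ih =>
    intro a b hd ha cov j hj
    rw [PySem.List.pyRange_one_cons (by omega), List.foldl_cons]
    set f := fun (c : List (List String)) (i : Int) => if i < PySem.Str.len token
        then c.set i.toNat ((c.getD i.toNat []) ++ [v]) else c with hf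
    have hlen : (f cov a).length = cov.length := by
      simp only [hf]; split <;> simp
    rw [ih (a+1) b (by omega) (by omega) (f cov a) j (by omega)]
    have hget : ∀ (jj : Nat), jj < cov.length → (f cov a).getD jj [] =
        if a = (jj : Int) ∧ (jj : Int) < PySem.Str.len token
        then cov.getD jj [] ++ [v] else cov.getD jj [] := by
      intro jj hjj
      simp only [hf]
      split_ifs with h1 h2 h3
      · rw [List.getD_eq_getElem?_getD, List.getElem?_set]
        have : a.toNat = jj := by omega
        simp [this, hjj, List.getD_eq_getElem?_getD]
      · rw [List.getD_eq_getElem?_getD, List.getElem?_set]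
        have : ¬ a.toNat = jj := by omega
        simp [this]
      · omega
      · rfl
    rw [hget j hj]
    split_ifs <;> first | rfl | omega

theorem pvMark_getD (token v : String) (s : Int) (hs : 0 ≤ s) (cov : List (List String))
    (j : Nat) (hj : j < cov.length) :
    (pvMark token cov v s).getD j [] =
      if s ≤ (j : Int) ∧ (j : Int) < s + PySem.Str.len v ∧ (j : Int) < PySem.Str.len token
      then cov.getD j [] ++ [v] else cov.getD j [] :=
  pvMarkAux_getD token v _ s (s + PySem.Str.len v) rfl hs cov j hj

theorem pv_filter_ge_split (l : List Int) (hl : l.Pairwise (· < ·)) (p : Int) (hp : p ∈ l)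
    (k : Int) (hk : k ≤ p) (hmin : ∀ s ∈ l, k ≤ s → p ≤ s) :
    l.filter (fun s => decide (k ≤ s)) = p :: l.filter (fun s => decide (p + 1 ≤ s)) := by
  induction l with
  | nil => cases hp
  | cons a t ih =>
    rw [List.pairwise_cons] at hl
    rcases List.mem_cons.mp hp with rfl | hpt
    · rw [List.filter_cons, List.filter_cons]
      rw [if_pos (by simpa using hk), if_neg (by simp)]
      congr 1
      apply List.filter_congr
      intro x hx
      have := hl.1 x hx
      simp only [decide_eq_decide]
      omega
    · have hap : a < p := hl.1 p hpt
      have hak : ¬ k ≤ a := fun h => absurd (hmin a (.head t) h) (by omega)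
      rw [List.filter_cons, List.filter_cons, if_neg (by simpa using hak),
        if_neg (by simp; omega)]
      exact ih hl.2 hpt (fun s hs h => hmin s (.tail a hs) h)

theorem pvWhileA_eq (token v : String) (hv : 1 ≤ v.toList.length) :
    ∀ (fuel k : Nat) (cov : List (List String)), k ≤ token.toList.length →
      token.toList.length + 1 ≤ fuel + k →
      pvWhileA token v fuel (k : Int) cov =
        ((pvOccs token v).filter (fun s => decide ((k : Int) ≤ s))).foldl
          (fun c s => pvMark token c v s) cov := by
  intro fuel
  induction fuel with
  | zero => intro k cov hk hf; omega
  | succ fuel ih =>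
    intro k cov hk hf
    rw [pvWhileA]
    simp only []
    by_cases hneg : PySem.Str.findFrom token v (k : Int) = -1
    · rw [if_pos hneg]
      rw [PySem.Str.findFrom_eq] at hneg
      have hno := (PySem.Chars.findFrom_natCast_eq_neg_one_iff token.toList v.toList k hk).mp hneg
      have : (pvOccs token v).filter (fun s => decide ((k : Int) ≤ s)) = [] := by
        rw [List.filter_eq_nil_iff]
        intro s hs hks
        rw [decide_eq_true_iff] at hks
        obtain ⟨h0, hb, hp⟩ := (pvOccs_mem token v s).mp hs
        apply hno
        have hdd : token.toList.drop s.toNat = (token.toList.drop k).drop (s.toNat - k) := by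
          rw [List.drop_drop]; congr 1; omega
        rw [hdd] at hp
        exact hp.isInfix.trans (List.drop_suffix _ _).isInfix
      rw [this]
      rfl
    · rw [if_neg hneg]
      rw [PySem.Str.findFrom_eq] at hneg
      simp only [PySem.Str.findFrom_eq]
      obtain ⟨hge, hpre, hmin⟩ := PySem.Chars.findFrom_natCast_spec token.toList v.toList k hk hneg
      set P := PySem.Chars.findFrom token.toList v.toList (k : Int) with hP
      have hP0 : 0 ≤ P := le_trans (by exact_mod_cast Nat.zero_le k) hge
      have hPp : P = (P.toNat : Int) := by omega
      have hlb : P.toNat + v.toList.length ≤ token.toList.length := by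
        have := hpre.length_le
        rw [List.length_drop] at this
        have : v.toList.length ≤ token.toList.length - P.toNat := this
        have hPle : P.toNat ≤ token.toList.length := by
          by_contra hgt
          rw [not_le] at hgt
          have : token.toList.drop P.toNat = [] := List.drop_eq_nil_of_le (by omega)
          rw [this] at hpre
          have := hpre.length_le
          simp at this
          omega
        omega
      have hmem : P ∈ pvOccs token v := by
        rw [pvOccs_mem]
        exact ⟨hP0, by omega, hpre⟩
      have hmin' : ∀ s ∈ pvOccs token v, (k : Int) ≤ s → P ≤ s := by
        intro s hs hks
        by_contra hlt
        rw [not_le] at hlt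
        obtain ⟨h0, hb, hp⟩ := (pvOccs_mem token v s).mp hs
        exact hmin s.toNat (by omega) (by omega) hp
      rw [pv_filter_ge_split _ (pvOccs_pairwise token v) P hmem (k : Int) hge hmin']
      rw [List.foldl_cons]
      have hre : P + 1 = ((P.toNat + 1 : Nat) : Int) := by omega
      have hfold : (PySem.List.pyRange P (P + PySem.Str.len v) 1).foldl
            (fun c i => if i < PySem.Str.len token
              then c.set i.toNat ((c.getD i.toNat []) ++ [v]) else c) cov
          = pvMark token cov v P := rfl
      rw [hfold, hre]
      exact ih (P.toNat + 1) (pvMark token cov v P) (by omega) (by omega)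

theorem pvStep_eq (token v : String) (hv : 1 ≤ v.toList.length) (cov : List (List String)) :
    pvWhileA token v (token.toList.length + 1) 0 cov =
      (pvOccs token v).foldl (fun c s => pvMark token c v s) cov := by
  have h := pvWhileA_eq token v hv (token.toList.length + 1) 0 cov (by omega) (by omega)
  rw [Nat.cast_zero] at h
  rw [h]
  congr 1
  rw [List.filter_eq_self]
  intro s hs
  exact decide_eq_true ((pvOccs_mem token v s).mp hs).1

theorem pvTable_length (token : String) (T : List (String × Int × Int)) :
    ∀ (cov : List (List String)),
    (T.foldl (fun c t => pvMark token c t.1 t.2.1) cov).length = cov.length := by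
  induction T with
  | nil => intro cov; rfl
  | cons t T ih => intro cov; rw [List.foldl_cons, ih, pvMark_length]

theorem pvTable_getD (token : String) (T : List (String × Int × Int)) :
    ∀ (cov : List (List String)) (j : Nat), j < cov.length → (∀ t ∈ T, 0 ≤ t.2.1) →
      (T.foldl (fun c t => pvMark token c t.1 t.2.1) cov).getD j [] =
        cov.getD j [] ++ (T.filter (fun t => decide (t.2.1 ≤ (j : Int) ∧
            (j : Int) < t.2.1 + PySem.Str.len t.1 ∧ (j : Int) < PySem.Str.len token))).map
          (fun t => t.1) := by
  induction T with
  | nil => intro cov j hj h; simp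
  | cons t T ih =>
    intro cov j hj h
    rw [List.foldl_cons, ih (pvMark token cov t.1 t.2.1) j
      (by rw [pvMark_length]; exact hj) (fun x hx => h x (.tail t hx))]
    rw [pvMark_getD token t.1 t.2.1 (h t (.head T)) cov j hj]
    rw [List.filter_cons]
    split_ifs with h1 h2 h3
    · simp
    · rw [decide_eq_true_iff] at h2; omega
    · rw [decide_eq_true_iff] at h3; exact absurd h3 h1
    · simp

-- the two branches of B's bucket update are one and the same insert
theorem pvBucketStep (d : PySem.Dict String (List Int)) (g : String) (s : Int) :
    (if d.contains g then d.insert g ((d.getD g []) ++ [s]) else d.insert g [s])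
      = d.insert g ((d.getD g []) ++ [s]) := by
  by_cases h : d.contains g = true
  · rw [if_pos h]
  · rw [if_neg h, PySem.Dict.getD_of_not_contains d [] (by simpa using h)]
    rfl

theorem pvBucket_getD (g : Int → String) (l : List Int) :
    ∀ (d : PySem.Dict String (List Int)) (w : String),
    (l.foldl (fun d s => d.insert (g s) ((d.getD (g s) []) ++ [s])) d).getD w [] =
      d.getD w [] ++ l.filter (fun s => g s == w) := by
  induction l with
  | nil => intro d w; simp
  | cons a t ih =>
    intro d w
    rw [List.foldl_cons, ih, PySem.Dict.getD_insert, List.filter_cons]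
    by_cases h : w = g a
    · rw [if_pos h, if_pos (by simp [h]), h, List.append_assoc, List.singleton_append]
    · rw [if_neg h, if_neg (by simpa using fun hh => h hh.symm)]

theorem pvIndex_getD (token : String) (lengths : List Int) :
    ∀ (d : PySem.Dict String (List Int)) (w : String),
    (lengths.foldl (fun d L =>
        (PySem.List.pyRange 0 (PySem.Str.len token - L + 1) 1).foldl (fun d s =>
          let gram := PySem.Str.slice token (some s) (some (s + L))
          if d.contains gram then d.insert gram ((d.getD gram []) ++ [s])
          else d.insert gram [s]) d) d).getD w [] =
      d.getD w [] ++ (lengths.map (fun L =>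
        (PySem.List.pyRange 0 (PySem.Str.len token - L + 1) 1).filter
          (fun s => PySem.Str.slice token (some s) (some (s + L)) == w))).flatten := by
  induction lengths with
  | nil => intro d w; simp
  | cons L ls ih =>
    intro d w
    rw [List.foldl_cons, ih]
    have hstep : ((PySem.List.pyRange 0 (PySem.Str.len token - L + 1) 1).foldl (fun d s =>
          let gram := PySem.Str.slice token (some s) (some (s + L))
          if d.contains gram then d.insert gram ((d.getD gram []) ++ [s])
          else d.insert gram [s]) d)
        = ((PySem.List.pyRange 0 (PySem.Str.len token - L + 1) 1).foldl (fun d s =>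
          d.insert (PySem.Str.slice token (some s) (some (s + L)))
            ((d.getD (PySem.Str.slice token (some s) (some (s + L))) []) ++ [s])) d) := by
      apply PySem.List.foldl_congr_mem
      intro acc s _
      exact pvBucketStep acc _ s
    rw [hstep, pvBucket_getD]
    rw [List.map_cons, List.flatten_cons, List.append_assoc]

-- a length-L slice inside the token has length L, so only L = len(v) buckets can hold v
theorem pvOther_len_nil (token w : String) (L : Int) (h0 : 0 ≤ L)
    (hne : L ≠ PySem.Str.len w) :
    (PySem.List.pyRange 0 (PySem.Str.len token - L + 1) 1).filter
      (fun s => PySem.Str.slice token (some s) (some (s + L)) == w) = [] := by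
  rw [List.filter_eq_nil_iff]
  intro s hs hb
  rw [PySem.List.mem_pyRange_one] at hs
  rw [beq_iff_eq, ← String.toList_inj, PySem.Str.toList_slice,
    PySem.Chars.slice_eq_listSlice, PySem.List.slice_toNat _ hs.1 (by omega)] at hb
  have hlen := congrArg List.length hb
  rw [List.length_take, List.length_drop] at hlen
  have hlt := PySem.Str.len_eq token
  have hlw := PySem.Str.len_eq w
  omega

theorem pvIndex_occs (token v : String) (lengths : List Int) (hnd : lengths.Nodup)
    (hpos : ∀ L ∈ lengths, 0 ≤ L) (hmem : PySem.Str.len v ∈ lengths) :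
    (lengths.map (fun L =>
        (PySem.List.pyRange 0 (PySem.Str.len token - L + 1) 1).filter
          (fun s => PySem.Str.slice token (some s) (some (s + L)) == v))).flatten
      = pvOccs token v := by
  induction lengths with
  | nil => cases hmem
  | cons L ls ih =>
    rw [List.map_cons, List.flatten_cons]
    rw [List.nodup_cons] at hnd
    rcases List.mem_cons.mp hmem with hL | hmem'
    · have hnil : (ls.map (fun L =>
          (PySem.List.pyRange 0 (PySem.Str.len token - L + 1) 1).filter
            (fun s => PySem.Str.slice token (some s) (some (s + L)) == v))).flatten = [] := by
        rw [List.flatten_eq_nil_iff]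
        intro l hl
        rw [List.mem_map] at hl
        obtain ⟨L', hL', rfl⟩ := hl
        exact pvOther_len_nil token v L' (hpos L' (.tail L hL'))
          (by rintro rfl; rw [hL] at hL'; exact hnd.1 hL')
      rw [hnil, List.append_nil, ← hL]
      rfl
    · rw [pvOther_len_nil token v L (hpos L (.head ls))
        (by rintro h; rw [h] at hnd; exact hnd.1 hmem'), List.nil_append]
      exact ih hnd.2 (fun x hx => hpos x (.tail L hx)) hmem'

theorem pvFlatMap_congr_mem {α β : Type} (l : List α) (f g : α → List β)
    (h : ∀ a ∈ l, f a = g a) : l.flatMap f = l.flatMap g := by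
  induction l with
  | nil => rfl
  | cons a t ih =>
    rw [List.flatMap_cons, List.flatMap_cons, h a (.head t),
      ih (fun x hx => h x (.tail a hx))]

theorem pvMarkBFold_length (v : String) (l : List Int) :
    ∀ (cov : List (List String)),
      (l.foldl (fun c i => c.set i.toNat ((c.getD i.toNat []) ++ [v])) cov).length
        = cov.length := by
  induction l with
  | nil => intro cov; rfl
  | cons a t ih => intro cov; rw [List.foldl_cons, ih, List.length_set]

theorem pvMarkBAux_getD (v : String) (d : Nat) :
    ∀ (a b : Int), (b - a).toNat = d → 0 ≤ a →
    ∀ (cov : List (List String)) (j : Nat), j < cov.length →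
    ((PySem.List.pyRange a b 1).foldl
        (fun c i => c.set i.toNat ((c.getD i.toNat []) ++ [v])) cov).getD j [] =
      if a ≤ (j : Int) ∧ (j : Int) < b
      then cov.getD j [] ++ [v] else cov.getD j [] := by
  induction d with
  | zero =>
    intro a b hd ha cov j hj
    rw [PySem.List.pyRange_one_eq_nil (by omega)]
    simp only [List.foldl_nil]
    rw [if_neg (by omega)]
  | succ d ih =>
    intro a b hd ha cov j hj
    rw [PySem.List.pyRange_one_cons (by omega), List.foldl_cons]
    rw [ih (a+1) b (by omega) (by omega) _ j (by rw [List.length_set]; exact hj)]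
    have hget : (cov.set a.toNat ((cov.getD a.toNat []) ++ [v])).getD j [] =
        if a = (j : Int) then cov.getD j [] ++ [v] else cov.getD j [] := by
      rw [List.getD_eq_getElem?_getD, List.getElem?_set]
      by_cases h : a = (j : Int)
      · have : a.toNat = j := by omega
        simp [h, hj, List.getD_eq_getElem?_getD]
      · have : ¬ a.toNat = j := by omega
        simp [this, h, List.getD_eq_getElem?_getD]
    rw [hget]
    split_ifs <;> first | rfl | omega

theorem pvTableB_length (T : List (String × Int × Int)) :
    ∀ (cov : List (List String)),
      (T.foldl (fun cov t => (PySem.List.pyRange t.2.1 (t.2.1 + t.2.2) 1).foldl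
        (fun c i => c.set i.toNat ((c.getD i.toNat []) ++ [t.1])) cov) cov).length
      = cov.length := by
  induction T with
  | nil => intro cov; rfl
  | cons t T ih => intro cov; rw [List.foldl_cons, ih, pvMarkBFold_length]

theorem pvTableB_getD (T : List (String × Int × Int)) :
    ∀ (cov : List (List String)) (j : Nat), j < cov.length → (∀ t ∈ T, 0 ≤ t.2.1) →
      (T.foldl (fun cov t => (PySem.List.pyRange t.2.1 (t.2.1 + t.2.2) 1).foldl
          (fun c i => c.set i.toNat ((c.getD i.toNat []) ++ [t.1])) cov) cov).getD j [] =
        cov.getD j [] ++ (T.filter (fun t => decide (t.2.1 ≤ (j : Int) ∧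
            (j : Int) < t.2.1 + t.2.2))).map (fun t => t.1) := by
  induction T with
  | nil => intro cov j hj h; simp
  | cons t T ih =>
    intro cov j hj h
    rw [List.foldl_cons, ih _ j (by rw [pvMarkBFold_length]; exact hj)
      (fun x hx => h x (.tail t hx))]
    rw [pvMarkBAux_getD t.1 _ t.2.1 (t.2.1 + t.2.2) rfl (h t (.head T)) cov j hj]
    rw [List.filter_cons]
    split_ifs with h1 h2 h3
    · simp
    · rw [decide_eq_true_iff] at h2; omega
    · rw [decide_eq_true_iff] at h3; exact absurd h3 h1
    · simp

-- ===== VERDICT (by name: the statement is the Claim_ definition above) =====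
theorem find_overlaps_in_token_spec : Claim_equal_find_overlaps_in_token := by
  unfold Claim_equal_find_overlaps_in_token
  intro token vocab _
  unfold Spec_find_overlaps_in_token find_overlaps_in_token find_overlaps_in_token_alt
  simp only []
  set vl := PySem.List.sorted
    (vocab.filter (fun v => decide (1 < PySem.Str.len v) && PySem.Str.isIn v token))
    (fun v => PySem.Str.len v) true with hvl
  have hlt := PySem.Str.len_eq token
  set n := token.toList.length with hn
  have hfuel : (PySem.Str.len token).toNat = n := by omega
  have hmemlen : ∀ v ∈ vl, 1 ≤ v.toList.length := by
    intro v hv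
    rw [hvl, PySem.List.mem_sorted, List.mem_filter, Bool.and_eq_true, decide_eq_true_iff] at hv
    have := PySem.Str.len_eq v
    omega
  set T : List (String × Int × Int) := vl.flatMap (fun v =>
    (pvOccs token v).map (fun s => (v, s, PySem.Str.len v))) with hT
  have hTmem : ∀ t ∈ T, ∃ v ∈ vl, ∃ s ∈ pvOccs token v, t = (v, s, PySem.Str.len v) := by
    intro t ht
    rw [hT, List.mem_flatMap] at ht
    obtain ⟨v, hv, ht⟩ := ht
    rw [List.mem_map] at ht
    obtain ⟨s, hs, rfl⟩ := ht
    exact ⟨v, hv, s, hs, rfl⟩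
  set init := (PySem.List.pyRange 0 (PySem.Str.len token) 1).map
    (fun _ => ([] : List String)) with hinit
  have hinit_len : init.length = n := by
    rw [hinit, List.length_map, PySem.List.length_pyRange_one]
    omega
  have hinit_getD : ∀ j : Nat, init.getD j [] = [] := by
    intro j
    rw [hinit, List.map_const', List.getD_eq_getElem?_getD]
    rcases Nat.lt_or_ge j (PySem.List.pyRange 0 (PySem.Str.len token) 1).length with h | h
    · rw [List.getElem?_replicate, if_pos h]; rfl
    · rw [List.getElem?_eq_none (by simpa using h)]; rfl
  -- A's fold over vocab words = the fold over the flat table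
  have hA : vl.foldl (fun cov v => pvWhileA token v ((PySem.Str.len token).toNat + 1) 0 cov) init
      = T.foldl (fun c t => pvMark token c t.1 t.2.1) init := by
    rw [hT, List.foldl_flatMap]
    apply PySem.List.foldl_congr_mem
    intro cov v hv
    rw [hfuel, pvStep_eq token v (hmemlen v hv) cov, List.foldl_map]
  rw [hA]
  -- B's table (read off the n-gram index) is the same flat table T
  set lengths := PySem.List.dedup (vl.map (fun v => PySem.Str.len v)) with hlens
  have hTB : vl.flatMap (fun v =>
      ((lengths.foldl (fun d L =>
          (PySem.List.pyRange 0 (PySem.Str.len token - L + 1) 1).foldl (fun d s =>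
            let gram := PySem.Str.slice token (some s) (some (s + L))
            if d.contains gram then d.insert gram ((d.getD gram []) ++ [s])
            else d.insert gram [s]) d)
        (PySem.Dict.empty : PySem.Dict String (List Int))).getD v []).map
        (fun s => (v, s, PySem.Str.len v))) = T := by
    rw [hT]
    apply pvFlatMap_congr_mem
    intro v hv
    rw [pvIndex_getD, PySem.Dict.getD_empty, List.nil_append,
      pvIndex_occs token v lengths (PySem.List.nodup_dedup _)
        (by
          intro L hL
          rw [hlens, PySem.List.mem_dedup, List.mem_map] at hL
          obtain ⟨u, _, rfl⟩ := hL
          have := PySem.Str.len_eq u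
          omega)
        (by
          rw [hlens, PySem.List.mem_dedup]
          exact List.mem_map_of_mem hv)]
  rw [hTB]
  -- now compare the two table folds index by index
  have hT0 : ∀ t ∈ T, 0 ≤ t.2.1 := by
    intro t ht
    obtain ⟨v, hv, s, hs, rfl⟩ := hTmem t ht
    exact ((pvOccs_mem token v s).mp hs).1
  apply List.ext_getElem
  · rw [pvTable_length, pvTableB_length]
  · intro j h1 h2
    have hjn : j < n := by
      rw [pvTable_length, hinit_len] at h1
      exact h1
    rw [← List.getD_eq_getElem _ [] h1, ← List.getD_eq_getElem _ [] h2,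
      pvTable_getD token T init j (by omega) hT0,
      pvTableB_getD T init j (by omega) hT0, hinit_getD j, List.nil_append, List.nil_append]
    congr 1
    apply List.filter_congr
    intro t ht
    obtain ⟨v, hv, s, hs, rfl⟩ := hTmem t ht
    obtain ⟨h0, hb, hp⟩ := (pvOccs_mem token v s).mp hs
    simp only [decide_eq_decide]
    have hlv := PySem.Str.len_eq v
    constructor
    · rintro ⟨ha, hbb, _⟩; exact ⟨ha, hbb⟩
    · rintro ⟨ha, hbb⟩; exact ⟨ha, hbb, by omega⟩
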